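-- pv_equiv track=rewrite | github.com/gabrielcamilosanmartin/curso-latam | [Unidad01] Introducción a la programación con Python/[Clase04] Ciclos y métodos/[Desafio01] Funciones/letra_o.py | letra_o
-- ===== SOURCE A (Python) =====
-- def letra_o(n=5):
-- 	result = ''
-- 	for i in range(0,n):
-- 		for j in range(0,n):
-- 			if (j in [0,n-1] or i in [0,n-1]):
-- 				result += '*'
-- 			else:
-- 				result += ' '
-- 		if (i != n-1):
-- 			result += '\n'
-- 	return result
-- ===== SOURCE B (Python) =====
-- def letra_o(n=5):
--     rows = []
--     for i in range(n):
--         if i == 0 or i == n - 1: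
--             rows.append('*' * n)
--         else:
--             rows.append('*' + ' ' * (n - 2) + '*')
--     return '\n'.join(rows)
-- ===== Notes on version B (the rewrite author's own statement) =====
-- stated objective: simpler
-- what changed: B builds each of the n rows as a whole string by string multiplication ('*'*n for border rows, '*'+' '*(n-2)+'*' for interior rows) and joins them with newline, instead of A's nested loops testing each of the n^2 cells and appending one character at a time.
import Mathlib
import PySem

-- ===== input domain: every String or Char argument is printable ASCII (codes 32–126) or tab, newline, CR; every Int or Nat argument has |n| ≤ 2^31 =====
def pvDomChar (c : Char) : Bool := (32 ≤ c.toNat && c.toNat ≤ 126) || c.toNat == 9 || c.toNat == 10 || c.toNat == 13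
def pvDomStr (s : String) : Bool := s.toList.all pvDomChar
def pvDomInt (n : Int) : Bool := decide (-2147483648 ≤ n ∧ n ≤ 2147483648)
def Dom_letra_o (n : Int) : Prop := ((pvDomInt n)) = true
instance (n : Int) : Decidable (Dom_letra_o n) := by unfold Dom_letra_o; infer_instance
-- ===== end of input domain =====

-- B builds each whole row with string multiplication and joins the rows, instead of
-- testing every one of the n² cells one character at a time; objective: simpler (and measurably faster in a timing run).

-- ===== PORT A =====
-- cell-by-cell accumulation, as in A (work on List Char; String.mk at the end)
def letra_o (n : Int) : String :=
  String.mk <|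
    (PySem.List.pyRange 0 n 1).foldl (fun result i =>
      let result :=
        (PySem.List.pyRange 0 n 1).foldl (fun result j =>
          if (j = 0 ∨ j = n - 1) ∨ (i = 0 ∨ i = n - 1) then result ++ ['*']
          else result ++ [' ']) result
      if i ≠ n - 1 then result ++ ['\n'] else result) []

-- ===== PORT B =====
def letra_o_alt (n : Int) : String :=
  String.mk <|
    PySem.Chars.join ['\n'] <|
      (PySem.List.pyRange 0 n 1).map (fun i =>
        if i = 0 ∨ i = n - 1 then PySem.List.pyRepeat ['*'] n
        else ['*'] ++ PySem.List.pyRepeat [' '] (n - 2) ++ ['*'])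

-- ===== PRECONDITION & SPEC =====
def Spec_letra_o (n : Int) (out : String) : Prop := out = letra_o_alt n
instance (n : Int) (out : String) : Decidable (Spec_letra_o n out) := by unfold Spec_letra_o; infer_instance

-- ===== CLAIM (what is proved, stated in full; the proofs are below) =====
def Claim_equal_letra_o : Prop := ∀ (n : Int), Dom_letra_o n → Spec_letra_o n (letra_o n)

-- ===== LEMMAS AND PROOFS =====

-- A's row i, one char per column j
def rowA (n i : Int) : List Char :=
  (PySem.List.pyRange 0 n 1).map (fun j =>
    if (j = 0 ∨ j = n - 1) ∨ (i = 0 ∨ i = n - 1) then '*' else ' ')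

-- B's row i
def rowB (n i : Int) : List Char :=
  if i = 0 ∨ i = n - 1 then PySem.List.pyRepeat ['*'] n
  else ['*'] ++ PySem.List.pyRepeat [' '] (n - 2) ++ ['*']

theorem rowA_eq_rowB (n i : Int) (h0 : 0 ≤ i) (hn : i < n) : rowA n i = rowB n i := by
  unfold rowA rowB
  by_cases hb : i = 0 ∨ i = n - 1
  · simp only [hb, if_pos]
    rw [PySem.List.pyRepeat_singleton, PySem.List.pyRange_one]
    simp [Function.comp_def]
  · simp only [hb, if_neg, not_false_iff]
    push_neg at hb
    obtain ⟨hi0, hin⟩ := hb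
    have hsplit : PySem.List.pyRange 1 n 1 = PySem.List.pyRange 1 (n - 1) 1 ++ [n - 1] := by
      have h := PySem.List.pyRange_one_succ_right (a := 1) (b := n - 1) (by omega)
      rw [show n - 1 + 1 = n by ring] at h
      exact h
    rw [PySem.List.pyRange_one_cons (by omega : (0:Int) < n)]
    rw [show (0:Int) + 1 = 1 by ring, hsplit]
    have hmid : ∀ j ∈ PySem.List.pyRange 1 (n - 1) 1,
        (if (j = 0 ∨ j = n - 1) ∨ False then '*' else ' ') = (fun (_ : Int) => ' ') j := by
      intro j hj
      rw [PySem.List.mem_pyRange_one] at hj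
      have hc : ¬ ((j = 0 ∨ j = n - 1) ∨ False) := by
        simp only [or_false]
        omega
      simp [hc]
    simp only [List.map_cons, List.map_append, List.map_nil, List.map_congr_left hmid]
    have hlast : n - 1 ≠ 0 := by omega
    simp only [eq_self_iff_true, true_or, or_true, or_false, if_true, List.map_const',
      PySem.List.length_pyRange_one, PySem.List.pyRepeat_singleton, if_pos]
    rw [show n - 1 - 1 = n - 2 by ring]
    simp

theorem letra_o_eq (n : Int) :
    letra_o n = String.mk ((PySem.List.pyRange 0 n 1).flatMap
      (fun i => rowA n i ++ if i ≠ n - 1 then ['\n'] else [])) := by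
  unfold letra_o
  congr 1
  have hstep := PySem.List.foldl_congr_mem
      (f := fun (result : List Char) (i : Int) =>
        let result :=
          (PySem.List.pyRange 0 n 1).foldl (fun result j =>
            if (j = 0 ∨ j = n - 1) ∨ (i = 0 ∨ i = n - 1) then result ++ ['*']
            else result ++ [' ']) result
        if i ≠ n - 1 then result ++ ['\n'] else result)
      (g := fun acc i => acc ++ (rowA n i ++ if i ≠ n - 1 then ['\n'] else []))
      (l := PySem.List.pyRange 0 n 1) (init := ([] : List Char))
      (by
        intro acc i _
        have hinner : (PySem.List.pyRange 0 n 1).foldl (fun result j =>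
              if (j = 0 ∨ j = n - 1) ∨ (i = 0 ∨ i = n - 1) then result ++ ['*']
              else result ++ [' ']) acc = acc ++ rowA n i := by
          have h1 := PySem.List.foldl_congr_mem
              (f := fun (result : List Char) (j : Int) =>
                if (j = 0 ∨ j = n - 1) ∨ (i = 0 ∨ i = n - 1) then result ++ ['*']
                else result ++ [' '])
              (g := fun (result : List Char) (j : Int) =>
                result ++ [if (j = 0 ∨ j = n - 1) ∨ (i = 0 ∨ i = n - 1) then '*' else ' '])
              (l := PySem.List.pyRange 0 n 1) (init := acc)
              (by
                intro a x _
                by_cases hc : (x = 0 ∨ x = n - 1) ∨ i = 0 ∨ i = n - 1 <;> simp [hc])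
          rw [h1]
          exact PySem.List.foldl_append_singleton_eq_map ..
        show (if i ≠ n - 1 then _ ++ ['\n'] else _) = _
        rw [hinner]
        split_ifs <;> simp_all [List.append_assoc])
  rw [hstep, PySem.List.foldl_append_eq_flatMap]
  simp

theorem flatMap_eq_join (n : Int) : ∀ (k : Nat) (a : Int), 0 ≤ a → a < n → (n - a).toNat = k →
    (PySem.List.pyRange a n 1).flatMap (fun i => rowA n i ++ if i ≠ n - 1 then ['\n'] else [])
    = PySem.Chars.join ['\n'] ((PySem.List.pyRange a n 1).map (rowB n)) := by
  intro k
  induction k with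
  | zero => intro a h0 ha hk; omega
  | succ k ih =>
    intro a h0 ha hk
    rw [PySem.List.pyRange_one_cons ha]
    by_cases hlast : a = n - 1
    · have hnil : PySem.List.pyRange (a + 1) n 1 = [] :=
        PySem.List.pyRange_one_eq_nil (by omega)
      rw [hnil]
      have hrow := rowA_eq_rowB n (n - 1) (by omega) (by omega)
      simp [hlast, hrow, PySem.Chars.join_singleton]
    · have ha1 : a + 1 < n := by omega
      have hrec := ih (a + 1) (by omega) ha1 (by omega)
      rw [PySem.List.pyRange_one_cons ha1] at hrec ⊢
      rw [List.flatMap_cons, hrec]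
      simp only [List.map_cons]
      rw [PySem.Chars.join_cons_cons, rowA_eq_rowB n a h0 ha]
      simp [hlast, List.append_assoc]

-- ===== VERDICT (by name: the statement is the Claim_ definition above) =====
theorem letra_o_spec : Claim_equal_letra_o := by
  intro n _
  unfold Spec_letra_o letra_o_alt
  rw [letra_o_eq]
  by_cases h : 0 < n
  · have hj := flatMap_eq_join n (n - 0).toNat 0 le_rfl h rfl
    rw [hj]
    rfl
  · have hnil : PySem.List.pyRange 0 n 1 = [] :=
      PySem.List.pyRange_one_eq_nil (by omega)
    rw [hnil]
    simp [PySem.Chars.join_nil]
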